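-- pv_equiv track=rewrite | github.com/cherry-k/advent-of-code | 2023/07/camelcards.py | count_equals_joker
-- ===== SOURCE A (Python) =====
-- from collections import defaultdict
--
-- def count_equals_joker(hand):
--     values = [i for i in hand]
--     value_counts = defaultdict(lambda:0)
--     for v in values:
--         value_counts[v]+=1
--     joker_count = value_counts['J']
--     if joker_count > 3:
--         return 5
--     else:
--         value_counts.pop('J')
--         return max(value_counts.values())+joker_count
-- ===== SOURCE B (Python) =====
-- def count_equals_joker(hand):
--     jokers = hand.count('J')
--     if jokers > 3:
--         return 5
--     best = 0
--     run = 0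
--     prev = None
--     for c in sorted(c for c in hand if c != 'J'):
--         run = run + 1 if c == prev else 1
--         prev = c
--         best = max(best, run)
--     return best + jokers
-- ===== Notes on version B (the rewrite author's own statement) =====
-- stated objective: alternative
-- what changed: B drops A's defaultdict frequency table entirely and instead sorts the non-joker cards and scans the sorted list once, tracking the current and best run of equal adjacent cards.
-- crash fix: On hands consisting only of at most three 'J' cards (including the empty hand) A raises ValueError (max() of an empty sequence) after popping 'J'; B returns the joker count there. — e.g. on count_equals_joker("JJ"): A raises ValueError, B returns 2
import Mathlib
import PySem

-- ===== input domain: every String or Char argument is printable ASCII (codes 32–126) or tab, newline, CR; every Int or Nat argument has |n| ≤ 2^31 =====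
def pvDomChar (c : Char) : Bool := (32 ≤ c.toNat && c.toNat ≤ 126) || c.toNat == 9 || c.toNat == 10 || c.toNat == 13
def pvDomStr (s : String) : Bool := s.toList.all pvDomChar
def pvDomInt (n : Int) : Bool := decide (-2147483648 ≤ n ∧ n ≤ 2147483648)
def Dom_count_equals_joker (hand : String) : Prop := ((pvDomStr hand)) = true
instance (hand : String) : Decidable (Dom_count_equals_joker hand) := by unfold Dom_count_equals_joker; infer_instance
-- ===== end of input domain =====

-- B replaces A's hash-frequency table by a sort-then-scan of runs over the non-joker cards (alternative algorithm); where A raises ValueError (max of an empty sequence) on all-joker hands of at most 3 cards, B returns the joker count.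


-- ===== PORT A =====
def count_equals_joker (hand : String) : Int :=
  let values := hand.toList
  let value_counts := values.foldl (fun d v => d.modify v 0 (· + 1)) PySem.Dict.empty
  -- defaultdict access value_counts['J'] inserts the default 0 when 'J' is absent
  let value_counts := if value_counts.contains 'J' then value_counts else value_counts.insert 'J' 0
  let joker_count := value_counts.getD 'J' 0
  if joker_count > 3 then 5
  else
    ((PySem.List.max? (value_counts.erase 'J').values (fun x => x)).getD 0) + joker_count

-- ===== PORT B =====
-- one scan step: new run length and best-so-far (run = run + 1 if c == prev else 1; best = max(best, run))
def bstep (st : Option Char × Int × Int) (c : Char) : Option Char × Int × Int :=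
  let run := if some c = st.1 then st.2.1 + 1 else 1
  (some c, run, max st.2.2 run)

def count_equals_joker_alt (hand : String) : Int :=
  let jokers : Int := hand.toList.count 'J'
  if jokers > 3 then 5
  else
    let s := PySem.List.sorted (hand.toList.filter (fun c => !(c == 'J'))) (fun c => c) false
    let st := s.foldl bstep ((none : Option Char), (0 : Int), (0 : Int))
    st.2.2 + jokers

-- ===== PRECONDITION & SPEC =====
-- Pre_ excludes exactly the inputs (every card a 'J' and at most three of them, incl. the
-- empty hand) on which A raises ValueError from max() over an empty sequence.
def Pre_count_equals_joker (hand : String) : Prop :=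
  3 < hand.toList.count 'J' ∨ hand.toList.any (fun c => !(c == 'J')) = true
instance (hand : String) : Decidable (Pre_count_equals_joker hand) := by
  unfold Pre_count_equals_joker; infer_instance
def pvWitness_count_equals_joker : String := "QJJQT"

-- A raises ValueError (max() of an empty sequence) on hands consisting of at most three jokers and nothing else; B returns the joker count there.
def Raises_count_equals_joker (hand : String) : Prop :=
  hand.toList.count 'J' ≤ 3 ∧ hand.toList.all (fun c => c == 'J') = true
instance (hand : String) : Decidable (Raises_count_equals_joker hand) := by
  unfold Raises_count_equals_joker; infer_instance
def pvRaiseWitness_count_equals_joker : String := "JJ"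
def pvRaiseWitnessOut_count_equals_joker : Int := 2

def Spec_count_equals_joker (hand : String) (out : Int) : Prop := out = count_equals_joker_alt hand
instance (hand : String) (out : Int) : Decidable (Spec_count_equals_joker hand out) := by unfold Spec_count_equals_joker; infer_instance

-- ===== CLAIM (what is proved, stated in full; the proofs are below) =====
def Claim_equal_count_equals_joker : Prop := ∀ (hand : String), Dom_count_equals_joker hand → Pre_count_equals_joker hand → Spec_count_equals_joker hand (count_equals_joker hand)
def Claim_raises_count_equals_joker : Prop := (∀ (hand : String), Dom_count_equals_joker hand → Raises_count_equals_joker hand → ¬ Pre_count_equals_joker hand) ∧ (Dom_count_equals_joker (pvRaiseWitness_count_equals_joker) ∧ Raises_count_equals_joker (pvRaiseWitness_count_equals_joker) ∧ count_equals_joker_alt (pvRaiseWitness_count_equals_joker) = pvRaiseWitnessOut_count_equals_joker)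

-- ===== LEMMAS AND PROOFS =====

-- reference value: the largest multiplicity among the distinct elements of m (0 for [])
def maxCount (m : List Char) : Int :=
  ((PySem.Set.ofList m).map (fun c => (m.count c : Int))).foldl max 0

-- value of the scan over s when a run of length r of previous character c is open
def runMax (c : Char) (r : Int) (s : List Char) : Int :=
  max (r + s.count c) (maxCount (s.filter (fun y => !(y == c))))

theorem max_absorb (b a x : Int) (h : a ≤ x) : max (max b a) x = max b x := by
  rw [max_assoc, max_eq_right h]

theorem foldl_max_shift (L : List Int) (a : Int) (ha : 0 ≤ a) :
    L.foldl max a = max a (L.foldl max 0) := by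
  calc L.foldl max a = L.foldl max (max a 0) := by rw [max_eq_left ha]
    _ = max a (L.foldl max 0) := by rw [List.foldl_assoc]

theorem ofList_filter (l : List Char) (p : Char → Bool) :
    PySem.Set.ofList (l.filter p) = (PySem.Set.ofList l).filter p := by
  induction l with
  | nil => rfl
  | cons x xs ih =>
    have hd : ∀ (s : List Char) (y : Char),
        PySem.Set.discard s y = s.filter (fun a => !(a == y)) := fun _ _ => rfl
    by_cases hp : p x
    · rw [List.filter_cons_of_pos hp, PySem.Set.ofList_cons, PySem.Set.ofList_cons, ih,
        List.filter_cons_of_pos hp, hd, hd, List.filter_filter, List.filter_filter]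
      have hcomm : (fun a : Char => !(a == x) && p a) = (fun a => p a && !(a == x)) :=
        funext fun a => Bool.and_comm _ _
      rw [hcomm]
    · rw [List.filter_cons_of_neg hp, PySem.Set.ofList_cons, ih,
        List.filter_cons_of_neg hp, hd, List.filter_filter]
      have hcomm : (fun a : Char => p a && !(a == x)) = p := by
        funext a
        by_cases hax : a = x
        · subst hax
          simp [hp]
        · simp [hax]
      rw [hcomm]

theorem maxCount_cons (x : Char) (t : List Char) :
    maxCount (x :: t) = max (1 + (t.count x : Int)) (maxCount (t.filter (fun y => !(y == x)))) := by
  have hc : (0:Int) ≤ 1 + (t.count x : Int) := by positivity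
  unfold maxCount
  rw [PySem.Set.ofList_cons]
  have hd : PySem.Set.discard (PySem.Set.ofList t) x
      = (PySem.Set.ofList t).filter (fun a => !(a == x)) := rfl
  rw [hd, List.map_cons, List.foldl_cons, ofList_filter]
  have h1 : ((x::t).count x : Int) = 1 + (t.count x : Int) := by
    rw [List.count_cons_self]; push_cast; ring
  have h2 : ((PySem.Set.ofList t).filter (fun a => !(a == x))).map (fun c => (((x :: t).count c : Int)))
      = ((PySem.Set.ofList t).filter (fun a => !(a == x))).map (fun c => ((t.count c : Int))) := by
    apply List.map_congr_left
    intro a ha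
    have hax : a ≠ x := by simpa using (List.mem_filter.mp ha).2
    simp [Ne.symm hax]
  have h3 : ((PySem.Set.ofList t).filter (fun a => !(a == x))).map (fun c => (((t.filter (fun y => !(y == x))).count c : Int)))
      = ((PySem.Set.ofList t).filter (fun a => !(a == x))).map (fun c => ((t.count c : Int))) := by
    apply List.map_congr_left
    intro a ha
    rw [List.count_filter (p := fun y => !(y == x)) (List.mem_filter.mp ha).2]
  rw [h1, h2, h3, max_eq_right hc, foldl_max_shift _ _ hc]

theorem scan_run (s : List Char) (hs : s.Pairwise (· ≤ ·)) :
    ∀ (c : Char) (r b : Int), (∀ x ∈ s, c ≤ x) → 0 ≤ b → 0 ≤ r → r ≤ b →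
      (s.foldl bstep (some c, r, b)).2.2 = max b (runMax c r s) := by
  induction s with
  | nil =>
    intro c r b _ _ hr hrb
    have h0 : runMax c r [] = r := by
      unfold runMax maxCount
      simp [max_eq_left hr]
    rw [List.foldl_nil, h0, max_eq_left hrb]
  | cons x t ih =>
    obtain ⟨hs1, hs2⟩ := List.pairwise_cons.mp hs
    intro c r b hle hb hr hrb
    by_cases hcx : x = c
    · subst hcx
      have hstep : bstep (some x, r, b) x = (some x, r + 1, max b (r + 1)) := by
        simp [bstep]
      rw [List.foldl_cons, hstep,
        ih hs2 x (r+1) (max b (r+1)) hs1 (le_trans hb (le_max_left _ _)) (by omega) (le_max_right _ _)]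
      have run_eq : runMax x r (x :: t) = runMax x (r+1) t := by
        unfold runMax
        rw [List.count_cons_self, List.filter_cons_of_neg (by simp)]
        push_cast
        ring_nf
      have hle2 : r + 1 ≤ runMax x (r+1) t := by
        have : (0:Int) ≤ (t.count x : Int) := by positivity
        exact le_trans (by omega) (le_max_left _ _)
      rw [run_eq, max_absorb _ _ _ hle2]
    · have hlt : c < x := lt_of_le_of_ne (hle x List.mem_cons_self) (fun h => hcx h.symm)
      have hstep : bstep (some c, r, b) x = (some x, 1, max b 1) := by
        simp [bstep, hcx]
      rw [List.foldl_cons, hstep,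
        ih hs2 x 1 (max b 1) hs1 (le_trans hb (le_max_left _ _)) (by omega) (le_max_right _ _)]
      have hnotin : c ∉ x :: t := by
        intro hmem
        rcases List.mem_cons.mp hmem with h | h
        · exact absurd h.symm hcx
        · exact absurd hlt (not_lt.mpr (hs1 c h))
      have hfil : (x :: t).filter (fun y => !(y == c)) = x :: t :=
        List.filter_eq_self.mpr (fun a ha => by
          simp only [Bool.not_eq_eq_eq_not, Bool.not_true, beq_eq_false_iff_ne]
          exact fun h => hnotin (h ▸ ha))
      have hM : maxCount (x :: t) = runMax x 1 t := by
        rw [maxCount_cons]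
        unfold runMax
        rfl
      have hrm : runMax c r (x :: t) = max r (maxCount (x :: t)) := by
        unfold runMax
        rw [List.count_eq_zero.mpr hnotin, hfil]
        norm_num
      have h1M : (1:Int) ≤ runMax x 1 t := by
        have : (0:Int) ≤ (t.count x : Int) := by positivity
        exact le_trans (by omega) (le_max_left _ _)
      rw [max_absorb _ _ _ h1M, hrm, hM, ← max_assoc, max_eq_left hrb]

theorem scan_sorted (s : List Char) (hs : s.Pairwise (· ≤ ·)) :
    (s.foldl bstep ((none : Option Char), (0 : Int), (0 : Int))).2.2 = maxCount s := by
  cases s with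
  | nil => rfl
  | cons x t =>
    obtain ⟨hs1, hs2⟩ := List.pairwise_cons.mp hs
    have hstep : bstep ((none : Option Char), (0:Int), (0:Int)) x = (some x, 1, max 0 1) := by
      simp [bstep]
    have h01 : (max (0:Int) 1) = 1 := by norm_num
    rw [List.foldl_cons, hstep, h01,
      scan_run t hs2 x 1 1 hs1 (by omega) (by omega) (le_refl _)]
    have hM : maxCount (x :: t) = runMax x 1 t := by
      rw [maxCount_cons]
      unfold runMax
      rfl
    have h1M : (1:Int) ≤ runMax x 1 t := by
      have : (0:Int) ≤ (t.count x : Int) := by positivity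
      exact le_trans (by omega) (le_max_left _ _)
    rw [hM, max_eq_right h1M]

theorem maxCount_perm {s s' : List Char} (h : s.Perm s') : maxCount s = maxCount s' := by
  unfold maxCount
  have hmap : (PySem.Set.ofList s).map (fun c => (s.count c : Int))
      = (PySem.Set.ofList s).map (fun c => (s'.count c : Int)) :=
    List.map_congr_left (fun a _ => by rw [h.count_eq])
  have hset : (PySem.Set.ofList s).Perm (PySem.Set.ofList s') := by
    refine (List.perm_ext_iff_of_nodup (PySem.Set.nodup_ofList _) (PySem.Set.nodup_ofList _)).mpr ?_
    intro a
    rw [PySem.Set.mem_ofList, PySem.Set.mem_ofList, h.mem_iff]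
  rw [hmap]
  exact (hset.map (fun c => (s'.count c : Int))).foldl_eq' (fun x _ y _ z => max_right_comm z x y) 0

-- A's surviving dict values: the multiplicities of the distinct non-'J' characters
theorem A_vals (l : List Char) :
    (((if (PySem.Dict.counter l).contains 'J' then PySem.Dict.counter l
       else (PySem.Dict.counter l).insert 'J' 0).erase 'J').values : List Int)
    = ((PySem.Set.ofList l).filter (fun c => !(c == 'J'))).map (fun k => (l.count k : Int)) := by
  have hval : ∀ (d : PySem.Dict Char Int), d.values = d.items.map (fun p => p.2) := fun _ => rfl
  have herase : ∀ (d : PySem.Dict Char Int),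
      (d.erase 'J').items = d.items.filter (fun p => !(p.1 == 'J')) := fun _ => rfl
  by_cases hc : (PySem.Dict.counter l).contains 'J'
  · rw [if_pos hc, hval, herase, PySem.Dict.items_counter, List.filter_map, List.map_map]
    rfl
  · have hcf : (PySem.Dict.counter l).contains 'J' = false := by simpa using hc
    rw [if_neg hc, hval, herase, PySem.Dict.items_insert_of_not_contains _ 0 hcf,
      List.filter_append, PySem.Dict.items_counter, List.filter_map]
    simp
    rfl
  
theorem max?_getD_eq_foldl (L : List Int) (h : ∀ x ∈ L, 0 ≤ x) :
    (PySem.List.max? L (fun y => y)).getD 0 = L.foldl max 0 := by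
  cases L with
  | nil => rfl
  | cons x t =>
    rw [PySem.List.max?_id_cons, Option.getD_some, List.foldl_cons,
      max_eq_right (h x List.mem_cons_self)]

theorem jc_eq (l : List Char) :
    ((if (PySem.Dict.counter l).contains 'J' then PySem.Dict.counter l
      else (PySem.Dict.counter l).insert 'J' 0).getD 'J' 0) = (l.count 'J' : Int) := by
  by_cases hc : (PySem.Dict.counter l).contains 'J'
  · rw [if_pos hc, PySem.Dict.getD_counter]
  · rw [if_neg hc, PySem.Dict.getD_insert_self]
    have hmem : 'J' ∉ l := by
      intro hmem
      exact hc (by rw [PySem.Dict.contains_counter]; simpa using hmem)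
    rw [List.count_eq_zero.mpr hmem]
    rfl

-- ===== VERDICT (by name: the statement is the Claim_ definition above) =====
theorem count_equals_joker_spec : Claim_equal_count_equals_joker := by
  intro hand _ _
  unfold Spec_count_equals_joker count_equals_joker count_equals_joker_alt
  simp only [← PySem.Dict.counter_eq_foldl, jc_eq]
  by_cases h3 : ((hand.toList.count 'J' : Int) > 3)
  · rw [if_pos h3, if_pos h3]
  · rw [if_neg h3, if_neg h3]
    congr 1
    rw [A_vals]
    have hm : ((PySem.Set.ofList hand.toList).filter (fun c => !(c == 'J'))).map (fun k => (hand.toList.count k : Int))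
        = (PySem.Set.ofList (hand.toList.filter (fun c => !(c == 'J')))).map
            (fun k => ((hand.toList.filter (fun c => !(c == 'J'))).count k : Int)) := by
      rw [ofList_filter]
      refine (List.map_congr_left ?_).symm
      intro a ha
      rw [List.count_filter (p := fun c => !(c == 'J')) (List.mem_filter.mp ha).2]
    rw [hm, max?_getD_eq_foldl _ (by
      intro v hv
      obtain ⟨k, _, rfl⟩ := List.mem_map.mp hv
      positivity)]
    have hpair : (PySem.List.sorted (hand.toList.filter (fun c => !(c == 'J'))) (fun c => c) false).Pairwise (· ≤ ·) := by
      simpa using PySem.List.sorted_pairwise (hand.toList.filter (fun c => !(c == 'J'))) (fun c => c)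
    rw [scan_sorted _ hpair,
      maxCount_perm (PySem.List.sorted_perm (hand.toList.filter (fun c => !(c == 'J'))) (fun c => c) false)]
    rfl

set_option maxRecDepth 4000

@[simp] theorem count_equals_joker_raises : Claim_raises_count_equals_joker := by
  unfold Claim_raises_count_equals_joker
  refine ⟨?_, by decide, by decide, by decide⟩
  intro hand _ hr
  unfold Raises_count_equals_joker at hr
  unfold Pre_count_equals_joker
  intro hpre
  rcases hpre with h | hany
  · omega
  · obtain ⟨c, hc, hne⟩ := List.any_eq_true.mp hany
    have := List.all_eq_true.mp hr.2 c hc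
    simp at hne this
    exact hne this
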